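-- pv_equiv track=rewrite | github.com/wakkoTheWarner/newProyectoTeam3 | main.py | semester_parser
-- ===== SOURCE A (Python) =====
-- def semester_parser(semester):
--     # Inicializa las variables
--     month_status = False
--     input_dates = ["Jan", "Feb", "Mar", "Apr", "May", "Jun", "Jul", "Aug", "Sep", "Oct", "Nov", "Dec"]
--     output_dates = ["ENERO", "FEBRERO", "MARZO", "ABRIL", "MAYO", "JUNIO", "JULIO", "AGOSTO", "SEPTIEMBRE", "OCTUBRE", "NOVIEMBRE", "DICIEMBRE"]
--     month_one = ""
--     month_two = ""
--     year = ""
--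
--     # Reemplaza los caracteres de tabulación y comas en el semestre
--     semester = semester.replace("\t", " ").replace(",", "")
--
--     # Itera sobre cada palabra en el semestre
--     for line in semester.split(" "):
--         # Si la palabra es un mes y no se ha asignado el primer mes
--         if line in input_dates and month_status == False:
--             month_one = output_dates[input_dates.index(line)]
--             month_status = True
--         # Si la palabra es un mes y ya se ha asignado el primer mes
--         elif line in input_dates and month_status == True:
--             month_two = output_dates[input_dates.index(line)]
--             break
--
--         # Si la palabra es un año
--         if line.isdigit() and len(line) == 4:
--             year = line
--
--     # Construye el semestre
--     semester = month_one + "-" + month_two + " " + year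
--
--     # Retorna el semestre
--     return semester
-- ===== SOURCE B (Python) =====
-- def semester_parser(semester):
--     months = {"Jan": "ENERO", "Feb": "FEBRERO", "Mar": "MARZO", "Apr": "ABRIL",
--               "May": "MAYO", "Jun": "JUNIO", "Jul": "JULIO", "Aug": "AGOSTO",
--               "Sep": "SEPTIEMBRE", "Oct": "OCTUBRE", "Nov": "NOVIEMBRE", "Dec": "DICIEMBRE"}
--     words = semester.replace("\t", " ").replace(",", "").split(" ")
--     # indices and words of the first two month tokens
--     hits = [(i, w) for i, w in enumerate(words) if w in months][:2]
--     month_one = months[hits[0][1]] if len(hits) >= 1 else ""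
--     month_two = months[hits[1][1]] if len(hits) >= 2 else ""
--     # the year is the last 4-digit token strictly before the second month token
--     cutoff = hits[1][0] if len(hits) >= 2 else len(words)
--     year = next((w for w in reversed(words[:cutoff]) if w.isdigit() and len(w) == 4), "")
--     return month_one + "-" + month_two + " " + year
-- ===== Notes on version B (the rewrite author's own statement) =====
-- stated objective: alternative
-- what changed: A's single stateful loop (month_status flag, break, interleaved year updates) is replaced by a two-phase decomposition: first collect the first two month tokens with their indices via enumerate/filter, then take the last 4-digit token before the second month by a backwards scan of the prefix.
import Mathlib
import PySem

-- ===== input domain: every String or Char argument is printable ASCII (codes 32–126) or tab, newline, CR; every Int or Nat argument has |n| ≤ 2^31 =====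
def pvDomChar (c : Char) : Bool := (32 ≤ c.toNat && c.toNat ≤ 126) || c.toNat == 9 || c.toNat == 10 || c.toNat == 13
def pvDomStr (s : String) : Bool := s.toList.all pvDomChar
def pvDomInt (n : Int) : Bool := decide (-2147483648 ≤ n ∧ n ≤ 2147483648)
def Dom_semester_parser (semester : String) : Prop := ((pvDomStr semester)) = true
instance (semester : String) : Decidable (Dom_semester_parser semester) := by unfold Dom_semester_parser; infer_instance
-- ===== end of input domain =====

-- B replaces A's stateful month_status loop by a two-step decomposition: collect the first two month
-- tokens with their indices, then take the last 4-digit token before the second month (objective: alternative).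

-- ===== PORT A =====
def aInputDates : List String := ["Jan","Feb","Mar","Apr","May","Jun","Jul","Aug","Sep","Oct","Nov","Dec"]
def aOutputDates : List String := ["ENERO","FEBRERO","MARZO","ABRIL","MAYO","JUNIO","JULIO","AGOSTO","SEPTIEMBRE","OCTUBRE","NOVIEMBRE","DICIEMBRE"]

-- the for-loop of A, with its break (the second elif returns directly); state = (month_status, month_one, month_two, year)
def aLoop : List String → Bool → String → String → String → String × String × String
  | [], _, m1, m2, y => (m1, m2, y)
  | line :: rest, status, m1, m2, y =>
    if aInputDates.contains line && !status then
      aLoop rest true (PySem.List.pyGetD aOutputDates (((PySem.List.index? aInputDates line).getD 0 : Nat) : Int) "") m2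
        (if PySem.Str.strIsdigit line && PySem.Str.len line == 4 then line else y)
    else if aInputDates.contains line && status then
      (m1, PySem.List.pyGetD aOutputDates (((PySem.List.index? aInputDates line).getD 0 : Nat) : Int) "", y)
    else
      aLoop rest status m1 m2 (if PySem.Str.strIsdigit line && PySem.Str.len line == 4 then line else y)

def semester_parser (semester : String) : String :=
  let s := PySem.Str.replace (PySem.Str.replace semester "\t" " ") "," ""
  let r := aLoop ((PySem.Str.split? s " ").getD []) false "" "" ""   -- split(" "): sep ≠ "", so split? is always some
  r.1 ++ "-" ++ r.2.1 ++ " " ++ r.2.2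

-- ===== PORT B =====
def bMonths : PySem.Dict String String := PySem.Dict.mk [("Jan","ENERO"),("Feb","FEBRERO"),("Mar","MARZO"),("Apr","ABRIL"),("May","MAYO"),("Jun","JUNIO"),("Jul","JULIO"),("Aug","AGOSTO"),("Sep","SEPTIEMBRE"),("Oct","OCTUBRE"),("Nov","NOVIEMBRE"),("Dec","DICIEMBRE")]

def bYearPred (w : String) : Bool := PySem.Str.strIsdigit w && PySem.Str.len w == 4

def semester_parser_alt (semester : String) : String :=
  let words := (PySem.Str.split? (PySem.Str.replace (PySem.Str.replace semester "\t" " ") "," "") " ").getD []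
  let hits := ((PySem.List.enumerate words).filter (fun p => bMonths.contains p.2)).take 2
  let month_one := match hits[0]? with | some h => bMonths.getD h.2 "" | none => ""
  let month_two := match hits[1]? with | some h => bMonths.getD h.2 "" | none => ""
  let cutoff : Int := match hits[1]? with | some h => h.1 | none => PySem.List.len words
  -- next(w for w in reversed(words[:cutoff]) if ...) with default ""
  let year := ((PySem.List.slice words none (some cutoff)).reverse.find? bYearPred).getD ""
  month_one ++ "-" ++ month_two ++ " " ++ year

-- ===== PRECONDITION & SPEC =====
def Spec_semester_parser (semester : String) (out : String) : Prop := out = semester_parser_alt semester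
instance (semester : String) (out : String) : Decidable (Spec_semester_parser semester out) := by unfold Spec_semester_parser; infer_instance

-- ===== CLAIM (what is proved, stated in full; the proofs are below) =====
def Claim_equal_semester_parser : Prop := ∀ (semester : String), Dom_semester_parser semester → Spec_semester_parser semester (semester_parser semester)

-- ===== LEMMAS AND PROOFS =====

-- the translation A computes for a month word
def aTrans (w : String) : String := PySem.List.pyGetD aOutputDates (((PySem.List.index? aInputDates w).getD 0 : Nat) : Int) ""

-- the year accumulator of A's loop
def lastY (ws : List String) (y : String) : String := ws.foldl (fun y w => if bYearPred w then w else y) y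

-- the month hits of the word list, A-side predicate
def mhits (ws : List String) (s : Int) : List (Int × String) :=
  (PySem.List.enumerate ws s).filter (fun p => aInputDates.contains p.2)

theorem contains_bridge (w : String) : bMonths.contains w = aInputDates.contains w := by
  simp [bMonths, aInputDates, PySem.Dict.contains_mk, beq_eq_decide, eq_comm]

theorem getD_bridge (w : String) (h : w ∈ aInputDates) : bMonths.getD w "" = aTrans w := by
  simp [aInputDates] at h
  rcases h with h|h|h|h|h|h|h|h|h|h|h|h <;> subst h <;> decide

theorem month_not_year (w : String) (h : w ∈ aInputDates) : bYearPred w = false := by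
  simp [aInputDates] at h
  rcases h with h|h|h|h|h|h|h|h|h|h|h|h <;> subst h <;> decide

theorem yearCond_eq (w : String) : (PySem.Str.strIsdigit w && PySem.Str.len w == 4) = bYearPred w := rfl

theorem lastY_cons (w : String) (ws : List String) (y : String) :
    lastY (w :: ws) y = lastY ws (if bYearPred w then w else y) := rfl

theorem revFind_eq_lastY (l : List String) (y : String) :
    ((l.reverse.find? bYearPred).getD y) = lastY l y := by
  induction l generalizing y with
  | nil => rfl
  | cons x xs ih =>
    rw [lastY_cons, ← ih]
    rw [List.reverse_cons, List.find?_append]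
    cases h : xs.reverse.find? bYearPred with
    | none => cases hb : bYearPred x <;> simp [List.find?, hb]
    | some v => simp

-- step lemmas for A's loop
theorem aLoop_month_false (x : String) (r : List String) (m1 m2 y : String) (hx : x ∈ aInputDates) :
    aLoop (x :: r) false m1 m2 y = aLoop r true (aTrans x) m2 y := by
  simp only [aLoop, yearCond_eq, month_not_year x hx, aTrans]
  simp [hx]

theorem aLoop_month_true (x : String) (r : List String) (m1 m2 y : String) (hx : x ∈ aInputDates) :
    aLoop (x :: r) true m1 m2 y = (m1, aTrans x, y) := by
  simp only [aLoop, aTrans]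
  simp [hx]

theorem aLoop_other (x : String) (r : List String) (st : Bool) (m1 m2 y : String) (hx : x ∉ aInputDates) :
    aLoop (x :: r) st m1 m2 y = aLoop r st m1 m2 (if bYearPred x then x else y) := by
  simp only [aLoop, yearCond_eq]
  rw [if_neg (by simp [hx]), if_neg (by simp [hx])]
  rfl


-- step lemmas for mhits
theorem mhits_cons_month (x : String) (r : List String) (s : Int) (hx : x ∈ aInputDates) :
    mhits (x :: r) s = (s, x) :: mhits r (s + 1) := by
  simp [mhits, PySem.List.enumerate_cons, hx]

theorem mhits_cons_other (x : String) (r : List String) (s : Int) (hx : x ∉ aInputDates) :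
    mhits (x :: r) s = mhits r (s + 1) := by
  simp [mhits, PySem.List.enumerate_cons, hx]

theorem mhits_mem_ge (ws : List String) (s : Int) (i : Int) (w : String)
    (h : (i, w) ∈ mhits ws s) : ∃ k : Nat, i = s + k ∧ k < ws.length := by
  have hm' : (i, w) ∈ PySem.List.enumerate ws s := List.mem_of_mem_filter h
  rw [PySem.List.mem_enumerate_iff] at hm'
  obtain ⟨k, hk, hp⟩ := hm'
  refine ⟨k, ?_, hk⟩
  simpa using congrArg Prod.fst hp

theorem mhits_mem_month (ws : List String) (s : Int) (i : Int) (w : String)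
    (h : (i, w) ∈ mhits ws s) : w ∈ aInputDates := by
  have := List.of_mem_filter h
  simpa using this

theorem L_true_nil (ws : List String) (s : Int) (m1 y : String) (h : mhits ws s = []) :
    aLoop ws true m1 "" y = (m1, "", lastY ws y) := by
  induction ws generalizing s y with
  | nil => rfl
  | cons w rest ih =>
    by_cases hw : w ∈ aInputDates
    · rw [mhits_cons_month w rest s hw] at h; exact absurd h (by simp)
    · rw [mhits_cons_other w rest s hw] at h
      rw [aLoop_other w rest true m1 "" y hw, ih (s+1) _ h, lastY_cons]

theorem L_true_cons (ws : List String) (s : Int) (m1 y : String) (i : Int) (w : String) (t : List (Int × String))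
    (h : mhits ws s = (i, w) :: t) :
    aLoop ws true m1 "" y = (m1, aTrans w, lastY (ws.take (i - s).toNat) y) := by
  induction ws generalizing s y with
  | nil => simp [mhits, PySem.List.enumerate] at h
  | cons x rest ih =>
    by_cases hx : x ∈ aInputDates
    · rw [mhits_cons_month x rest s hx] at h
      injection h with h1 h2
      injection h1 with hi hw
      subst hi; subst hw
      rw [aLoop_month_true x rest m1 "" y hx]
      simp [lastY]
    · rw [mhits_cons_other x rest s hx] at h
      obtain ⟨k, hk, _⟩ := mhits_mem_ge rest (s+1) i w (h ▸ List.mem_cons_self)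
      rw [aLoop_other x rest true m1 "" y hx, ih (s+1) _ h]
      have h1 : (i - s).toNat = k + 1 := by omega
      have h2 : (i - (s+1)).toNat = k := by omega
      rw [h1, h2, List.take_succ_cons, lastY_cons]

theorem L_false_nil (ws : List String) (s : Int) (y : String) (h : mhits ws s = []) :
    aLoop ws false "" "" y = ("", "", lastY ws y) := by
  induction ws generalizing s y with
  | nil => rfl
  | cons w rest ih =>
    by_cases hw : w ∈ aInputDates
    · rw [mhits_cons_month w rest s hw] at h; exact absurd h (by simp)
    · rw [mhits_cons_other w rest s hw] at h
      rw [aLoop_other w rest false "" "" y hw, ih (s+1) _ h, lastY_cons]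

theorem L_false_one (ws : List String) (s : Int) (y : String) (i : Int) (w : String)
    (h : mhits ws s = [(i, w)]) :
    aLoop ws false "" "" y = (aTrans w, "", lastY ws y) := by
  induction ws generalizing s y with
  | nil => simp [mhits, PySem.List.enumerate] at h
  | cons x rest ih =>
    by_cases hx : x ∈ aInputDates
    · rw [mhits_cons_month x rest s hx] at h
      injection h with h1 h2
      injection h1 with hi hw
      subst hw
      rw [aLoop_month_false x rest "" "" y hx, L_true_nil rest (s+1) _ _ h2,
          lastY_cons, month_not_year x hx]
      simp
    · rw [mhits_cons_other x rest s hx] at h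
      rw [aLoop_other x rest false "" "" y hx, ih (s+1) _ h, lastY_cons]

theorem L_false_two (ws : List String) (s : Int) (y : String) (i1 : Int) (w1 : String) (i2 : Int) (w2 : String) (t : List (Int × String))
    (h : mhits ws s = (i1, w1) :: (i2, w2) :: t) :
    aLoop ws false "" "" y = (aTrans w1, aTrans w2, lastY (ws.take (i2 - s).toNat) y) := by
  induction ws generalizing s y with
  | nil => simp [mhits, PySem.List.enumerate] at h
  | cons x rest ih =>
    by_cases hx : x ∈ aInputDates
    · rw [mhits_cons_month x rest s hx] at h
      injection h with h1 h2
      injection h1 with hi hw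
      subst hw
      obtain ⟨k, hk, _⟩ := mhits_mem_ge rest (s+1) i2 w2 (h2 ▸ List.mem_cons_self)
      rw [aLoop_month_false x rest "" "" y hx, L_true_cons rest (s+1) _ _ i2 w2 t h2]
      have h1' : (i2 - s).toNat = k + 1 := by omega
      have h2' : (i2 - (s+1)).toNat = k := by omega
      rw [h1', h2', List.take_succ_cons, lastY_cons, month_not_year x hx]
      simp
    · rw [mhits_cons_other x rest s hx] at h
      obtain ⟨k, hk, _⟩ := mhits_mem_ge rest (s+1) i2 w2 (h ▸ List.mem_cons_of_mem _ List.mem_cons_self)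
      rw [aLoop_other x rest false "" "" y hx, ih (s+1) _ h]
      have h1' : (i2 - s).toNat = k + 1 := by omega
      have h2' : (i2 - (s+1)).toNat = k := by omega
      rw [h1', h2', List.take_succ_cons, lastY_cons]

theorem main_eq (semester : String) : semester_parser semester = semester_parser_alt semester := by
  simp only [semester_parser, semester_parser_alt]
  generalize (PySem.Str.split? (PySem.Str.replace (PySem.Str.replace semester "\t" " ") "," "") " ").getD [] = words
  have hfilt : (PySem.List.enumerate words 0).filter (fun p => bMonths.contains p.2) = mhits words 0 := by
    unfold mhits; exact List.filter_congr (fun a _ => by rw [contains_bridge])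
  have hlen : PySem.List.len words = ((words.length : Nat) : Int) := by simp [PySem.List.len_eq]
  rcases hsh : mhits words 0 with _ | ⟨⟨i1, w1⟩, rest⟩
  · rw [L_false_nil words 0 "" hsh, hfilt, hsh]
    simp only [List.take_nil, List.getElem?_nil]
    rw [hlen, PySem.List.slice_to_natCast, List.take_length, revFind_eq_lastY]
  · rcases rest with _ | ⟨⟨i2, w2⟩, t⟩
    · rw [L_false_one words 0 "" i1 w1 hsh, hfilt, hsh]
      have hm1 : w1 ∈ aInputDates := mhits_mem_month words 0 i1 w1 (hsh ▸ List.mem_cons_self)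
      rw [show List.take 2 [(i1, w1)] = [(i1, w1)] from rfl]
      simp only [List.getElem?_cons_zero, List.getElem?_cons_succ, List.getElem?_nil]
      rw [getD_bridge w1 hm1, hlen, PySem.List.slice_to_natCast, List.take_length, revFind_eq_lastY]
    · rw [L_false_two words 0 "" i1 w1 i2 w2 t hsh, hfilt, hsh]
      have hm1 : w1 ∈ aInputDates := mhits_mem_month words 0 i1 w1 (hsh ▸ List.mem_cons_self)
      have hm2 : w2 ∈ aInputDates := mhits_mem_month words 0 i2 w2 (hsh ▸ List.mem_cons_of_mem _ List.mem_cons_self)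
      obtain ⟨k, hk, _⟩ := mhits_mem_ge words 0 i2 w2 (hsh ▸ List.mem_cons_of_mem _ List.mem_cons_self)
      rw [show List.take 2 ((i1, w1) :: (i2, w2) :: t) = [(i1, w1), (i2, w2)] from rfl]
      simp only [List.getElem?_cons_zero, List.getElem?_cons_succ]
      rw [getD_bridge w1 hm1, getD_bridge w2 hm2,
          show i2 = ((k : Nat) : Int) from by omega,
          PySem.List.slice_to_natCast, revFind_eq_lastY,
          show ((((k : Nat) : Int)) - 0).toNat = k from by omega]

-- ===== VERDICT (by name: the statement is the Claim_ definition above) =====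
theorem semester_parser_spec : Claim_equal_semester_parser := by
  intro semester _
  unfold Spec_semester_parser
  exact main_eq semester
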